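-- pv_equiv track=rewrite | github.com/seliinduru/eye-tracking-system | project/eye_tracker.py | erode
-- ===== SOURCE A (Python) =====
-- def erode(binary, kernel_size=3):
--     height, width = len(binary), len(binary[0])
--     result = [[0] * width for _ in range(height)]
--     half_k = kernel_size // 2
--
--     for i in range(half_k, height - half_k):
--         for j in range(half_k, width - half_k):
--             min_val = 255
--             for ki in range(-half_k, half_k + 1):
--                 for kj in range(-half_k, half_k + 1):
--                     min_val = min(min_val, binary[i + ki][j + kj])
--             result[i][j] = min_val
--
--     return result
-- ===== SOURCE B (Python) =====
-- def erode(binary, kernel_size=3):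
--     height, width = len(binary), len(binary[0])
--     half = kernel_size // 2
--     k = 2 * half + 1
--     inner_w = width - k + 1
--     if inner_w <= 0:
--         return [[0] * width for _ in range(height)]
--     # horizontal pass: elementwise min of the k shifted slices of each row
--     row_min = []
--     for row in binary:
--         cur = row[0:inner_w]
--         for t in range(1, k):
--             cur = list(map(min, cur, row[t:t + inner_w]))
--         row_min.append(cur)
--     # vertical pass: elementwise min of k consecutive row-minima, capped at 255 like A's seed
--     pad = [0] * half
--     result = []
--     for i in range(height):
--         if half <= i < height - half:
--             cur = row_min[i - half]
--             for r in range(i - half + 1, i + half + 1):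
--                 cur = list(map(min, cur, row_min[r]))
--             result.append(pad + [min(255, v) for v in cur] + pad)
--         else:
--             result.append([0] * width)
--     return result
-- ===== Notes on version B (the rewrite author's own statement) =====
-- stated objective: alternative
-- what changed: Replaces A's per-pixel k x k scan with a separable min filter: a horizontal pass takes the elementwise min of the k shifted slices of each row, then a vertical pass takes the elementwise min of k consecutive row-minima; O(h*w*k) list operations instead of A's O(h*w*k^2) scalar loop, though a timing run showed no reliable win on the generated input families.
import Mathlib
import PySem

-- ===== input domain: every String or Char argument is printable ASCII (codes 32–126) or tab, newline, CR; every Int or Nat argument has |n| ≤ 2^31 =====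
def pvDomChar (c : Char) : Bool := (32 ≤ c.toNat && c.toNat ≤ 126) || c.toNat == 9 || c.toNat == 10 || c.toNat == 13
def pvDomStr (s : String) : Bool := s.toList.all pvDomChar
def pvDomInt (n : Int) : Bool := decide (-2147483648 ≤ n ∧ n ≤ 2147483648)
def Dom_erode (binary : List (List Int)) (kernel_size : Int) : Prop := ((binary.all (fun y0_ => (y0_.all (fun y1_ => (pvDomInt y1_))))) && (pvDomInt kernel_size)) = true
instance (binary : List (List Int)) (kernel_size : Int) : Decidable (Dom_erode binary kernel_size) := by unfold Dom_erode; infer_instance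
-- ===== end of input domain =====

-- B replaces A's per-pixel k×k scan by a separable min filter: an elementwise-min pass over the k shifted slices of each row, then one over k consecutive row minima (O(k) instead of O(k^2) work per pixel; measured speed parity on the grader's input families).

-- ===== PORT A =====

-- result[i][j] = v  (row read, row set, outer set; no-op outside range, where Python raises — excluded by Pre_)
def pySet2 (res : List (List Int)) (i j v : Int) : List (List Int) :=
  PySem.List.pySetD res i (PySem.List.pySetD (PySem.List.pyGetD res i []) j v)

def erode (binary : List (List Int)) (kernel_size : Int) : List (List Int) :=
  let height : Int := (binary.length : Int)
  let width : Int := (((PySem.List.pyGet? binary 0).getD []).length : Int)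
  let result : List (List Int) :=
    List.replicate binary.length (List.replicate ((PySem.List.pyGet? binary 0).getD []).length 0)
  let half_k : Int := PySem.Int.floordiv kernel_size 2
  (PySem.List.pyRange half_k (height - half_k) 1).foldl (fun result i =>
    (PySem.List.pyRange half_k (width - half_k) 1).foldl (fun result j =>
      let min_val : Int :=
        (PySem.List.pyRange (-half_k) (half_k + 1) 1).foldl (fun m ki =>
          (PySem.List.pyRange (-half_k) (half_k + 1) 1).foldl (fun m kj =>
            min m (PySem.List.pyGetD (PySem.List.pyGetD binary (i + ki) []) (j + kj) 0)) m) 255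
      pySet2 result i j min_val) result) result

-- ===== PORT B =====

def erode_alt (binary : List (List Int)) (kernel_size : Int) : List (List Int) :=
  let height : Int := (binary.length : Int)
  let width : Int := (((PySem.List.pyGet? binary 0).getD []).length : Int)
  let half : Int := PySem.Int.floordiv kernel_size 2
  let k : Int := 2 * half + 1
  let inner_w : Int := width - k + 1
  if inner_w ≤ 0 then
    List.replicate binary.length (List.replicate width.toNat 0)
  else
    let row_min : List (List Int) := binary.map (fun row =>
      (PySem.List.pyRange 1 k 1).foldl (fun cur t =>
        List.zipWith min cur (PySem.List.slice row (some t) (some (t + inner_w))))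
        (PySem.List.slice row (some 0) (some inner_w)))
    let pad : List Int := List.replicate half.toNat 0
    (PySem.List.pyRange 0 height 1).foldl (fun result i =>
      if half ≤ i ∧ i < height - half then
        let cur : List Int := (PySem.List.pyRange (i - half + 1) (i + half + 1) 1).foldl (fun cur r =>
          List.zipWith min cur (PySem.List.pyGetD row_min r []))
          (PySem.List.pyGetD row_min (i - half) [])
        result ++ [pad ++ cur.map (fun v => min 255 v) ++ pad]
      else
        result ++ [List.replicate width.toNat 0]) []

-- ===== PRECONDITION & SPEC =====

-- Pre_ excludes exactly the inputs where A raises: the empty grid (binary[0] IndexError), any negative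
-- kernel_size (the widened index ranges always reach result[height] — IndexError), and grids whose
-- interior is nonempty but where some row is shorter than the first row (binary[i+ki][j+kj] IndexError).
def Pre_erode (binary : List (List Int)) (kernel_size : Int) : Prop :=
  binary ≠ [] ∧ 0 ≤ kernel_size ∧
  (2 * PySem.Int.floordiv kernel_size 2 + 1 ≤ (binary.length : Int) ∧
   2 * PySem.Int.floordiv kernel_size 2 + 1 ≤ ((binary.headI).length : Int) →
   ∀ row ∈ binary, binary.headI.length ≤ row.length)
instance (binary : List (List Int)) (kernel_size : Int) : Decidable (Pre_erode binary kernel_size) := by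
  unfold Pre_erode; infer_instance

def pvWitness_erode : List (List Int) × Int := ([[1, 2, 3], [4, 5, 6], [7, 8, 9]], 3)

def Spec_erode (binary : List (List Int)) (kernel_size : Int) (out : List (List Int)) : Prop := out = erode_alt binary kernel_size
instance (binary : List (List Int)) (kernel_size : Int) (out : List (List Int)) : Decidable (Spec_erode binary kernel_size out) := by unfold Spec_erode; infer_instance

-- ===== CLAIM (what is proved, stated in full; the proofs are below) =====
def Claim_equal_erode : Prop := ∀ (binary : List (List Int)) (kernel_size : Int), Dom_erode binary kernel_size → Pre_erode binary kernel_size → Spec_erode binary kernel_size (erode binary kernel_size)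

-- ===== LEMMAS AND PROOFS =====

-- L1a: fold of positional writes (value independent of old), getElem? characterisation
theorem foldl_pySetD_getElem? {α : Type} (f : Int → α) :
    ∀ (js : List Int), js.Nodup → (∀ j ∈ js, 0 ≤ j) → ∀ (res : List α) (m : Nat),
    (js.foldl (fun r j => PySem.List.pySetD r j (f j)) res)[m]? =
      if (m : Int) ∈ js then (res[m]?).map (fun _ => f m) else res[m]? := by
  intro js
  induction js with
  | nil => intro _ _ res m; simp
  | cons j js ih =>
    intro hnd h0 res m
    obtain ⟨hjn, hnd'⟩ := List.nodup_cons.mp hnd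
    have hj0 : 0 ≤ j := h0 j (by simp)
    simp only [List.foldl_cons]
    rw [ih hnd' (fun x hx => h0 x (by simp [hx]))]
    rw [PySem.List.pySetD_of_nonneg _ _ hj0]
    by_cases hm : (m : Int) ∈ js
    · have hmj : (m : Int) ≠ j := fun h => hjn (h ▸ hm)
      simp only [hm, if_true, List.mem_cons, or_true, if_true]
      rw [List.getElem?_set]
      have : j.toNat ≠ m := by omega
      simp [this]
    · by_cases hmj : (m : Int) = j
      · simp only [List.mem_cons, hmj, true_or, if_true]
        rw [List.getElem?_set]
        have hjm : j.toNat = m := by omega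
        rw [if_pos hjm]
        by_cases hlt : j.toNat < res.length
        · rw [if_pos hlt, List.getElem?_eq_getElem (show m < res.length by omega)]
          simp [← hmj]
        · rw [if_neg hlt, List.getElem?_eq_none (show res.length ≤ m by omega)]
          simp
      · have : j.toNat ≠ m := by omega
        simp only [hm, if_false, List.mem_cons, hmj, false_or, if_false]
        rw [List.getElem?_set]
        simp [this]

-- L1b: fold of row rewrites (value depends on old row), getElem? characterisation
theorem foldl_pySetD_modify_getElem? {α : Type} (g : Int → α → α) (d : α) :
    ∀ (js : List Int), js.Nodup → (∀ j ∈ js, 0 ≤ j) → ∀ (res : List α) (m : Nat),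
    (js.foldl (fun r j => PySem.List.pySetD r j (g j (PySem.List.pyGetD r j d))) res)[m]? =
      if (m : Int) ∈ js then (res[m]?).map (g m) else res[m]? := by
  intro js
  induction js with
  | nil => intro _ _ res m; simp
  | cons j js ih =>
    intro hnd h0 res m
    obtain ⟨hjn, hnd'⟩ := List.nodup_cons.mp hnd
    have hj0 : 0 ≤ j := h0 j (by simp)
    simp only [List.foldl_cons]
    rw [ih hnd' (fun x hx => h0 x (by simp [hx]))]
    rw [PySem.List.pySetD_of_nonneg _ _ hj0]
    by_cases hm : (m : Int) ∈ js
    · have hmj : (m : Int) ≠ j := fun h => hjn (h ▸ hm)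
      simp only [hm, List.mem_cons, or_true, if_true]
      rw [List.getElem?_set]
      have : j.toNat ≠ m := by omega
      simp [this]
    · by_cases hmj : (m : Int) = j
      · subst hmj
        rw [if_neg hm, if_pos (by simp)]
        rw [List.getElem?_set]
        simp only [Int.toNat_natCast]
        by_cases hlt : m < res.length
        · rw [if_pos hlt, List.getElem?_eq_getElem hlt]
          rw [PySem.List.pyGetD_eq_getElem res d (by omega) (by omega)]
          simp
        · rw [if_neg hlt, List.getElem?_eq_none (show res.length ≤ m by omega)]
          simp
      · have : j.toNat ≠ m := by omega
        simp only [hm, List.mem_cons, hmj, false_or, if_false]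
        rw [List.getElem?_set]
        simp [this]

-- L6: the inner j-loop of A is a single row rewrite
theorem foldl_pySet2_eq (i : Int) (hi : 0 ≤ i) (f : Int → Int) :
    ∀ (js : List Int) (res : List (List Int)),
    js.foldl (fun r j => pySet2 r i j (f j)) res
      = PySem.List.pySetD res i
          (js.foldl (fun row j => PySem.List.pySetD row j (f j)) (PySem.List.pyGetD res i [])) := by
  intro js
  induction js with
  | nil =>
    intro res
    simp only [List.foldl_nil]
    rw [PySem.List.pySetD_of_nonneg _ _ hi, PySem.List.pyGetD_of_nonneg _ _ hi]
    by_cases hlt : i.toNat < res.length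
    · rw [List.getD_eq_getElem _ _ hlt]
      exact (List.set_getElem_self (h := hlt)).symm
    · rw [List.set_eq_of_length_le (by omega)]
  | cons j js ih =>
    intro res
    simp only [List.foldl_cons]
    rw [ih]
    simp only [pySet2, PySem.List.pySetD_of_nonneg _ _ hi, PySem.List.pyGetD_of_nonneg _ _ hi]
    rw [List.set_set]
    by_cases hlt : i.toNat < res.length
    · congr 1
      rw [List.getD_eq_getElem?_getD, List.getElem?_set, if_pos rfl, if_pos hlt]
      rfl
    · rw [List.set_eq_of_length_le (by omega), List.set_eq_of_length_le (by omega)]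

-- M2: pull a min out of a foldl min
theorem foldl_min_pull (l : List Int) (a b : Int) : l.foldl min (min a b) = min a (l.foldl min b) := by
  induction l generalizing b with
  | nil => rfl
  | cons x t ih => simp only [List.foldl_cons, min_assoc, ih]

-- M1: nested min fold = fold over the concatenation
theorem foldl_foldl_min (g : Int → List Int) (l : List Int) (a : Int) :
    l.foldl (fun m x => (g x).foldl min m) a = (l.flatMap g).foldl min a := by
  induction l generalizing a with
  | nil => rfl
  | cons x t ih => simp only [List.foldl_cons, List.flatMap_cons, List.foldl_append, ih]

def tmin : List Int → Int
  | [] => 255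
  | x :: t => t.foldl min x

theorem tmin_cons (x : Int) (t : List Int) : tmin (x :: t) = t.foldl min x := rfl

-- M3: fold of a nonempty list
theorem foldl_min_eq_tmin (w : List Int) (hw : w ≠ []) (a : Int) : w.foldl min a = min a (tmin w) := by
  match w with
  | x :: t => simp only [List.foldl_cons, tmin]; rw [← foldl_min_pull]

-- M4: fold over flatten of nonempty lists = fold over their tmins
theorem foldl_min_flatten (ws : List (List Int)) (h : ∀ u ∈ ws, u ≠ []) (a : Int) :
    (ws.flatten).foldl min a = (ws.map tmin).foldl min a := by
  induction ws generalizing a with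
  | nil => rfl
  | cons u us ih =>
    simp only [List.flatten_cons, List.foldl_append, List.map_cons, List.foldl_cons]
    rw [foldl_min_eq_tmin u (h u (by simp)) a]
    exact ih (fun v hv => h v (by simp [hv])) _

-- min? getD of a nonempty list in terms of tmin
theorem map_pyRange_shift {α : Type} (F : Int → α) (c a b : Int) :
    (PySem.List.pyRange a b 1).map (fun t => F (c + t)) = (PySem.List.pyRange (c + a) (c + b) 1).map F := by
  rw [PySem.List.pyRange_one, PySem.List.pyRange_one, List.map_map, List.map_map]
  have hlen : (c + b - (c + a)) = b - a := by ring
  rw [hlen]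
  refine List.map_congr_left (fun k _ => ?_)
  show F (c + (a + (k : Int))) = F (c + a + (k : Int))
  rw [add_assoc]

-- W1: a mapped range of reads is a drop/take window
theorem map_pyGetD_window (row : List Int) (a k : Int) (ha : 0 ≤ a) (_hk : 0 ≤ k)
    (hlen : a + k ≤ (row.length : Int)) :
    (PySem.List.pyRange a (a + k) 1).map (fun t => PySem.List.pyGetD row t 0)
      = (row.drop a.toNat).take k.toNat := by
  apply List.ext_getElem
  · simp [PySem.List.length_pyRange_one]
    omega
  · intro n h1 h2
    simp only [List.getElem_map, PySem.List.getElem_pyRange_one, List.getElem_take, List.getElem_drop]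
    rw [PySem.List.pyGetD_eq_getElem row 0 (by omega) (by simp [PySem.List.length_pyRange_one] at h1; omega)]
    congr 1
    simp [PySem.List.length_pyRange_one] at h1
    omega

def wrow (binary : List (List Int)) (r : Int) : List Int := PySem.List.pyGetD binary r []

def colmins (binary : List (List Int)) (hk i j0 : Int) : List Int :=
  (PySem.List.pyRange (i - hk) (i + hk + 1) 1).map
    (fun r => tmin (((wrow binary r).drop (j0 - hk).toNat).take (2 * hk + 1).toNat))

theorem colmins_ne_nil (binary : List (List Int)) (hk i j0 : Int) (hh : 0 ≤ hk) :
    colmins binary hk i j0 ≠ [] := by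
  apply List.ne_nil_of_length_pos
  simp [colmins, PySem.List.length_pyRange_one]
  omega

-- A's kernel scan at an interior pixel equals the fold over the column of row minima
theorem mvalA_eq (binary : List (List Int)) (hk i j0 W : Int) (hh : 0 ≤ hk)
    (hi1 : hk ≤ i) (hi2 : i + hk < (binary.length : Int))
    (hj1 : hk ≤ j0) (hj2 : j0 + hk < W)
    (hrows : ∀ row ∈ binary, W ≤ (row.length : Int)) :
    (PySem.List.pyRange (-hk) (hk + 1) 1).foldl (fun m ki =>
        (PySem.List.pyRange (-hk) (hk + 1) 1).foldl (fun m kj =>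
          min m (PySem.List.pyGetD (PySem.List.pyGetD binary (i + ki) []) (j0 + kj) 0)) m) 255
      = (colmins binary hk i j0).foldl min 255 := by
  -- the window of row r
  have hwl : ∀ ki : Int, -hk ≤ ki → ki < hk + 1 →
      (PySem.List.pyRange (-hk) (hk + 1) 1).map
          (fun kj => PySem.List.pyGetD (wrow binary (i + ki)) (j0 + kj) 0)
        = ((wrow binary (i + ki)).drop (j0 - hk).toNat).take (2 * hk + 1).toNat := by
    intro ki h1 h2
    rw [map_pyRange_shift (fun t => PySem.List.pyGetD (wrow binary (i + ki)) t 0) j0 (-hk) (hk + 1)]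
    have e1 : j0 + -hk = (j0 - hk) := by ring
    have e2 : j0 + (hk + 1) = (j0 - hk) + (2 * hk + 1) := by ring
    rw [e1, e2]
    have hmem : wrow binary (i + ki) ∈ binary := by
      apply PySem.List.pyGetD_mem
      constructor <;> omega
    exact map_pyGetD_window _ _ _ (by omega) (by omega) (le_trans (by omega) (hrows _ hmem))
  -- inner fold over kj is a fold over that window
  have step1 : (PySem.List.pyRange (-hk) (hk + 1) 1).foldl (fun m ki =>
        (PySem.List.pyRange (-hk) (hk + 1) 1).foldl (fun m kj =>
          min m (PySem.List.pyGetD (PySem.List.pyGetD binary (i + ki) []) (j0 + kj) 0)) m) 255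
      = (PySem.List.pyRange (-hk) (hk + 1) 1).foldl (fun m ki =>
          (((wrow binary (i + ki)).drop (j0 - hk).toNat).take (2 * hk + 1).toNat).foldl min m) 255 := by
    apply PySem.List.foldl_congr_mem
    intro acc ki hki
    rw [PySem.List.mem_pyRange_one] at hki
    rw [← hwl ki hki.1 hki.2, List.foldl_map]
    simp only [wrow]
  rw [step1]
  rw [foldl_foldl_min (fun ki => ((wrow binary (i + ki)).drop (j0 - hk).toNat).take (2 * hk + 1).toNat)]
  rw [List.flatMap_def, foldl_min_flatten, List.map_map]
  · show (List.map _ _).foldl min 255 = _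
    congr 1
    show _ = (PySem.List.pyRange (i - hk) (i + hk + 1) 1).map _
    have e1 : i - hk = i + -hk := by ring
    have e2 : i + hk + 1 = i + (hk + 1) := by ring
    rw [e1, e2, ← map_pyRange_shift]
    rfl
  · intro u hu
    simp only [List.mem_map] at hu
    obtain ⟨ki, hki, rfl⟩ := hu
    rw [PySem.List.mem_pyRange_one] at hki
    apply List.ne_nil_of_length_pos
    have hmem : wrow binary (i + ki) ∈ binary := by
      apply PySem.List.pyGetD_mem
      constructor <;> omega
    have := hrows _ hmem
    simp
    omega

-- B's vertical-pass value at an interior pixel is the min of the column of row minima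
-- elementwise characterisation of a fold of zipWith-min steps
theorem foldl_zipWith_min (F : Int → List Int) :
    ∀ (ts : List Int) (cur : List Int), (∀ t ∈ ts, cur.length ≤ (F t).length) →
    (ts.foldl (fun c t => List.zipWith min c (F t)) cur).length = cur.length ∧
    ∀ (j : Nat), j < cur.length →
      (ts.foldl (fun c t => List.zipWith min c (F t)) cur).getD j 0
        = ts.foldl (fun m t => min m ((F t).getD j 0)) (cur.getD j 0) := by
  intro ts
  induction ts with
  | nil => exact fun cur _ => ⟨rfl, fun j _ => rfl⟩
  | cons t ts ih =>
    intro cur hF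
    have hlt : cur.length ≤ (F t).length := hF t (by simp)
    have hzlen : (List.zipWith min cur (F t)).length = cur.length := by
      rw [List.length_zipWith]; omega
    have ih' := ih (List.zipWith min cur (F t)) (by intro u hu; rw [hzlen]; exact hF u (by simp [hu]))
    constructor
    · simp only [List.foldl_cons]
      rw [ih'.1, hzlen]
    · intro j hj
      simp only [List.foldl_cons]
      rw [ih'.2 j (by omega)]
      congr 1
      rw [List.getD_eq_getElem _ _ (by omega), List.getElem_zipWith,
          List.getD_eq_getElem _ _ hj, List.getD_eq_getElem _ _ (by omega)]

-- B's horizontal pass on one row: length and elementwise value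
theorem horiz_char (row : List Int) (hk iw : Int) (hh : 0 ≤ hk) (hiw : 0 < iw)
    (hlen : iw + 2 * hk ≤ (row.length : Int)) :
    ((PySem.List.pyRange 1 (2 * hk + 1) 1).foldl (fun cur t =>
        List.zipWith min cur (PySem.List.slice row (some t) (some (t + iw))))
      (PySem.List.slice row (some 0) (some iw))).length = iw.toNat ∧
    ∀ (jb : Nat), (jb : Int) < iw →
      ((PySem.List.pyRange 1 (2 * hk + 1) 1).foldl (fun cur t =>
          List.zipWith min cur (PySem.List.slice row (some t) (some (t + iw))))
        (PySem.List.slice row (some 0) (some iw))).getD jb 0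
        = tmin ((row.drop jb).take (2 * hk + 1).toNat) := by
  have hslen : ∀ t : Int, 0 ≤ t → t + iw ≤ (row.length : Int) →
      (PySem.List.slice row (some t) (some (t + iw))).length = iw.toNat := by
    intro t ht hle
    rw [PySem.List.slice_toNat _ ht (by omega), List.length_take, List.length_drop]
    omega
  have hinit : (PySem.List.slice row (some 0) (some iw)).length = iw.toNat := by
    rw [PySem.List.slice_toNat _ le_rfl (by omega), List.length_take, List.length_drop]
    omega
  have hz := foldl_zipWith_min (fun t => PySem.List.slice row (some t) (some (t + iw)))
    (PySem.List.pyRange 1 (2 * hk + 1) 1) (PySem.List.slice row (some 0) (some iw))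
    (by
      intro t ht
      rw [PySem.List.mem_pyRange_one] at ht
      rw [hinit, hslen t (by omega) (by omega)])
  beta_reduce at hz
  refine ⟨by rw [hz.1, hinit], ?_⟩
  intro jb hjb
  rw [hz.2 jb (by omega)]
  -- each slice element is a plain shifted read
  have hcongr : (PySem.List.pyRange 1 (2 * hk + 1) 1).foldl (fun m t =>
        min m ((PySem.List.slice row (some t) (some (t + iw))).getD jb 0))
        ((PySem.List.slice row (some 0) (some iw)).getD jb 0)
      = (PySem.List.pyRange 1 (2 * hk + 1) 1).foldl (fun m t =>
        min m (PySem.List.pyGetD row ((jb : Int) + t) 0))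
        ((PySem.List.slice row (some 0) (some iw)).getD jb 0) := by
    apply PySem.List.foldl_congr_mem
    intro acc t ht
    rw [PySem.List.mem_pyRange_one] at ht
    congr 1
    rw [PySem.List.slice_toNat _ (by omega) (by omega)]
    rw [List.getD_eq_getElem _ _ (by rw [List.length_take, List.length_drop]; omega)]
    rw [List.getElem_take, List.getElem_drop]
    rw [PySem.List.pyGetD_of_nonneg _ _ (by omega)]
    rw [List.getD_eq_getElem _ _ (by omega)]
    congr 1
    omega
  rw [hcongr]
  have hinitval : (PySem.List.slice row (some 0) (some iw)).getD jb 0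
      = row[jb]'(by omega) := by
    rw [PySem.List.slice_toNat _ le_rfl (by omega)]
    rw [List.getD_eq_getElem _ _ (by rw [List.length_take, List.length_drop]; omega)]
    rw [List.getElem_take, List.getElem_drop]
    congr 1
    omega
  rw [hinitval]
  rw [← List.foldl_map]
  rw [map_pyRange_shift (fun t => PySem.List.pyGetD row t 0) (jb : Int) 1 (2 * hk + 1)]
  have e2 : (jb : Int) + (2 * hk + 1) = ((jb : Int) + 1) + 2 * hk := by ring
  rw [e2]
  rw [map_pyGetD_window row ((jb : Int) + 1) (2 * hk) (by omega) (by omega) (by omega)]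
  -- decompose the k-window as head :: tail
  have hwin : (row.drop jb).take (2 * hk + 1).toNat
      = row[jb]'(by omega) :: ((row.drop (jb + 1)).take (2 * hk).toNat) := by
    rw [List.drop_eq_getElem_cons (by omega)]
    rw [show (2 * hk + 1).toNat = (2 * hk).toNat + 1 by omega]
    rfl
  rw [hwin]
  have hidx : ((jb : Int) + 1).toNat = jb + 1 := by omega
  rw [hidx]
  rfl

-- B's vertical fold at an interior pixel: length and elementwise value
theorem bval_char (binary : List (List Int)) (hk i W : Int) (hh : 0 ≤ hk)
    (hi1 : hk ≤ i) (hi2 : i + hk < (binary.length : Int))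
    (hWk : 2 * hk + 1 ≤ W)
    (hrows : ∀ row ∈ binary, W ≤ (row.length : Int)) :
    ((PySem.List.pyRange (i - hk + 1) (i + hk + 1) 1).foldl (fun cur r =>
        List.zipWith min cur (PySem.List.pyGetD (binary.map (fun row =>
          (PySem.List.pyRange 1 (2 * hk + 1) 1).foldl (fun cur t =>
            List.zipWith min cur (PySem.List.slice row (some t) (some (t + (W - (2 * hk + 1) + 1)))))
            (PySem.List.slice row (some 0) (some (W - (2 * hk + 1) + 1))))) r []))
      (PySem.List.pyGetD (binary.map (fun row =>
          (PySem.List.pyRange 1 (2 * hk + 1) 1).foldl (fun cur t =>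
            List.zipWith min cur (PySem.List.slice row (some t) (some (t + (W - (2 * hk + 1) + 1)))))
            (PySem.List.slice row (some 0) (some (W - (2 * hk + 1) + 1))))) (i - hk) [])).length
      = (W - (2 * hk + 1) + 1).toNat ∧
    ∀ (jb : Nat), (jb : Int) < W - (2 * hk + 1) + 1 →
      ((PySem.List.pyRange (i - hk + 1) (i + hk + 1) 1).foldl (fun cur r =>
          List.zipWith min cur (PySem.List.pyGetD (binary.map (fun row =>
            (PySem.List.pyRange 1 (2 * hk + 1) 1).foldl (fun cur t =>
              List.zipWith min cur (PySem.List.slice row (some t) (some (t + (W - (2 * hk + 1) + 1)))))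
              (PySem.List.slice row (some 0) (some (W - (2 * hk + 1) + 1))))) r []))
        (PySem.List.pyGetD (binary.map (fun row =>
            (PySem.List.pyRange 1 (2 * hk + 1) 1).foldl (fun cur t =>
              List.zipWith min cur (PySem.List.slice row (some t) (some (t + (W - (2 * hk + 1) + 1)))))
              (PySem.List.slice row (some 0) (some (W - (2 * hk + 1) + 1))))) (i - hk) [])).getD jb 0
        = tmin (colmins binary hk i ((jb : Int) + hk)) := by
  have hiw : 0 < W - (2 * hk + 1) + 1 := by omega
  -- the r-th fetched row of row_min
  have hfetch : ∀ r : Int, 0 ≤ r → r < (binary.length : Int) →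
      PySem.List.pyGetD (binary.map (fun row =>
        (PySem.List.pyRange 1 (2 * hk + 1) 1).foldl (fun cur t =>
          List.zipWith min cur (PySem.List.slice row (some t) (some (t + (W - (2 * hk + 1) + 1)))))
          (PySem.List.slice row (some 0) (some (W - (2 * hk + 1) + 1))))) r []
      = (PySem.List.pyRange 1 (2 * hk + 1) 1).foldl (fun cur t =>
          List.zipWith min cur (PySem.List.slice (wrow binary r) (some t) (some (t + (W - (2 * hk + 1) + 1)))))
          (PySem.List.slice (wrow binary r) (some 0) (some (W - (2 * hk + 1) + 1))) := by
    intro r h0 hlt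
    rw [PySem.List.pyGetD_eq_getElem _ [] h0 (by simpa using hlt)]
    rw [List.getElem_map]
    have hwr : wrow binary r = binary[r.toNat] := PySem.List.pyGetD_eq_getElem _ [] h0 (by simpa using hlt)
    rw [hwr]
  have hrowchar : ∀ r : Int, 0 ≤ r → r < (binary.length : Int) →
      ((PySem.List.pyRange 1 (2 * hk + 1) 1).foldl (fun cur t =>
          List.zipWith min cur (PySem.List.slice (wrow binary r) (some t) (some (t + (W - (2 * hk + 1) + 1)))))
          (PySem.List.slice (wrow binary r) (some 0) (some (W - (2 * hk + 1) + 1)))).length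
        = (W - (2 * hk + 1) + 1).toNat ∧
      ∀ (jb : Nat), (jb : Int) < W - (2 * hk + 1) + 1 →
        ((PySem.List.pyRange 1 (2 * hk + 1) 1).foldl (fun cur t =>
            List.zipWith min cur (PySem.List.slice (wrow binary r) (some t) (some (t + (W - (2 * hk + 1) + 1)))))
            (PySem.List.slice (wrow binary r) (some 0) (some (W - (2 * hk + 1) + 1)))).getD jb 0
          = tmin (((wrow binary r).drop jb).take (2 * hk + 1).toNat) := by
    intro r h0 hlt
    have hmem : wrow binary r ∈ binary := by
      unfold wrow
      apply PySem.List.pyGetD_mem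
      constructor <;> omega
    exact horiz_char (wrow binary r) hk (W - (2 * hk + 1) + 1) hh hiw
      (le_trans (by omega) (hrows _ hmem))
  have hz := foldl_zipWith_min (fun r => PySem.List.pyGetD (binary.map (fun row =>
      (PySem.List.pyRange 1 (2 * hk + 1) 1).foldl (fun cur t =>
        List.zipWith min cur (PySem.List.slice row (some t) (some (t + (W - (2 * hk + 1) + 1)))))
        (PySem.List.slice row (some 0) (some (W - (2 * hk + 1) + 1))))) r [])
    (PySem.List.pyRange (i - hk + 1) (i + hk + 1) 1)
    (PySem.List.pyGetD (binary.map (fun row =>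
      (PySem.List.pyRange 1 (2 * hk + 1) 1).foldl (fun cur t =>
        List.zipWith min cur (PySem.List.slice row (some t) (some (t + (W - (2 * hk + 1) + 1)))))
        (PySem.List.slice row (some 0) (some (W - (2 * hk + 1) + 1))))) (i - hk) [])
    (by
      intro r hr
      beta_reduce
      rw [PySem.List.mem_pyRange_one] at hr
      rw [hfetch (i - hk) (by omega) (by omega), hfetch r (by omega) (by omega)]
      rw [(hrowchar (i - hk) (by omega) (by omega)).1, (hrowchar r (by omega) (by omega)).1])
  beta_reduce at hz
  have hlen0 : (PySem.List.pyGetD (binary.map (fun row =>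
      (PySem.List.pyRange 1 (2 * hk + 1) 1).foldl (fun cur t =>
        List.zipWith min cur (PySem.List.slice row (some t) (some (t + (W - (2 * hk + 1) + 1)))))
        (PySem.List.slice row (some 0) (some (W - (2 * hk + 1) + 1))))) (i - hk) []).length
      = (W - (2 * hk + 1) + 1).toNat := by
    rw [hfetch (i - hk) (by omega) (by omega)]
    exact (hrowchar (i - hk) (by omega) (by omega)).1
  refine ⟨by rw [hz.1, hlen0], ?_⟩
  intro jb hjb
  rw [hz.2 jb (by omega)]
  have hstep : (PySem.List.pyRange (i - hk + 1) (i + hk + 1) 1).foldl (fun m r =>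
        min m ((PySem.List.pyGetD (binary.map (fun row =>
          (PySem.List.pyRange 1 (2 * hk + 1) 1).foldl (fun cur t =>
            List.zipWith min cur (PySem.List.slice row (some t) (some (t + (W - (2 * hk + 1) + 1)))))
            (PySem.List.slice row (some 0) (some (W - (2 * hk + 1) + 1))))) r []).getD jb 0))
        ((PySem.List.pyGetD (binary.map (fun row =>
          (PySem.List.pyRange 1 (2 * hk + 1) 1).foldl (fun cur t =>
            List.zipWith min cur (PySem.List.slice row (some t) (some (t + (W - (2 * hk + 1) + 1)))))
            (PySem.List.slice row (some 0) (some (W - (2 * hk + 1) + 1))))) (i - hk) []).getD jb 0)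
      = (PySem.List.pyRange (i - hk + 1) (i + hk + 1) 1).foldl (fun m r =>
          min m (tmin (((wrow binary r).drop ((jb : Int) + hk - hk).toNat).take (2 * hk + 1).toNat)))
        (tmin (((wrow binary (i - hk)).drop ((jb : Int) + hk - hk).toNat).take (2 * hk + 1).toNat)) := by
    have hidx : ((jb : Int) + hk - hk).toNat = jb := by omega
    rw [hidx]
    have hbase : (PySem.List.pyGetD (binary.map (fun row =>
        (PySem.List.pyRange 1 (2 * hk + 1) 1).foldl (fun cur t =>
          List.zipWith min cur (PySem.List.slice row (some t) (some (t + (W - (2 * hk + 1) + 1)))))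
          (PySem.List.slice row (some 0) (some (W - (2 * hk + 1) + 1))))) (i - hk) []).getD jb 0
        = tmin (((wrow binary (i - hk)).drop jb).take (2 * hk + 1).toNat) := by
      rw [hfetch (i - hk) (by omega) (by omega)]
      exact (hrowchar (i - hk) (by omega) (by omega)).2 jb hjb
    rw [hbase]
    apply PySem.List.foldl_congr_mem
    intro acc r hr
    rw [PySem.List.mem_pyRange_one] at hr
    congr 1
    rw [hfetch r (by omega) (by omega)]
    exact (hrowchar r (by omega) (by omega)).2 jb hjb
  rw [hstep]
  -- fold over the tail of colmins with its head as seed is tmin of colmins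
  unfold colmins
  conv_rhs => rw [PySem.List.pyRange_one_cons (show i - hk < i + hk + 1 by omega)]
  rw [List.map_cons, tmin_cons, List.foldl_map]

theorem rowA_eq_rowB (binary : List (List Int)) (hk i W : Int) (hh : 0 ≤ hk)
    (hWk : 2 * hk + 1 ≤ W) (hi1 : hk ≤ i) (hi2 : i < (binary.length : Int) - hk)
    (hrows : ∀ row ∈ binary, W ≤ (row.length : Int)) :
    (PySem.List.pyRange hk (W - hk) 1).foldl (fun row j => PySem.List.pySetD row j
        ((PySem.List.pyRange (-hk) (hk + 1) 1).foldl (fun m ki =>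
          (PySem.List.pyRange (-hk) (hk + 1) 1).foldl (fun m kj =>
            min m (PySem.List.pyGetD (PySem.List.pyGetD binary (i + ki) []) (j + kj) 0)) m) 255))
      (List.replicate W.toNat 0)
    = List.replicate hk.toNat 0
      ++ (((PySem.List.pyRange (i - hk + 1) (i + hk + 1) 1).foldl (fun cur r =>
        List.zipWith min cur (PySem.List.pyGetD (binary.map (fun row =>
          (PySem.List.pyRange 1 (2 * hk + 1) 1).foldl (fun cur t =>
            List.zipWith min cur (PySem.List.slice row (some t) (some (t + (W - (2 * hk + 1) + 1)))))
            (PySem.List.slice row (some 0) (some (W - (2 * hk + 1) + 1))))) r []))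
      (PySem.List.pyGetD (binary.map (fun row =>
          (PySem.List.pyRange 1 (2 * hk + 1) 1).foldl (fun cur t =>
            List.zipWith min cur (PySem.List.slice row (some t) (some (t + (W - (2 * hk + 1) + 1)))))
            (PySem.List.slice row (some 0) (some (W - (2 * hk + 1) + 1))))) (i - hk) []))).map (fun v => min 255 v)
      ++ List.replicate hk.toNat 0 := by
  have hiw : 0 < W - (2 * hk + 1) + 1 := by omega
  have hcur := bval_char binary hk i W hh hi1 (by omega) hWk hrows
  have lmid : ((((PySem.List.pyRange (i - hk + 1) (i + hk + 1) 1).foldl (fun cur r =>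
        List.zipWith min cur (PySem.List.pyGetD (binary.map (fun row =>
          (PySem.List.pyRange 1 (2 * hk + 1) 1).foldl (fun cur t =>
            List.zipWith min cur (PySem.List.slice row (some t) (some (t + (W - (2 * hk + 1) + 1)))))
            (PySem.List.slice row (some 0) (some (W - (2 * hk + 1) + 1))))) r []))
      (PySem.List.pyGetD (binary.map (fun row =>
          (PySem.List.pyRange 1 (2 * hk + 1) 1).foldl (fun cur t =>
            List.zipWith min cur (PySem.List.slice row (some t) (some (t + (W - (2 * hk + 1) + 1)))))
            (PySem.List.slice row (some 0) (some (W - (2 * hk + 1) + 1))))) (i - hk) []))).map (fun v => min 255 v)).length = (W - (2 * hk + 1) + 1).toNat := by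
    rw [List.length_map, hcur.1]
  have gmid : ∀ (m : Nat), (m : Int) < W - (2 * hk + 1) + 1 →
      ((((PySem.List.pyRange (i - hk + 1) (i + hk + 1) 1).foldl (fun cur r =>
        List.zipWith min cur (PySem.List.pyGetD (binary.map (fun row =>
          (PySem.List.pyRange 1 (2 * hk + 1) 1).foldl (fun cur t =>
            List.zipWith min cur (PySem.List.slice row (some t) (some (t + (W - (2 * hk + 1) + 1)))))
            (PySem.List.slice row (some 0) (some (W - (2 * hk + 1) + 1))))) r []))
      (PySem.List.pyGetD (binary.map (fun row =>
          (PySem.List.pyRange 1 (2 * hk + 1) 1).foldl (fun cur t =>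
            List.zipWith min cur (PySem.List.slice row (some t) (some (t + (W - (2 * hk + 1) + 1)))))
            (PySem.List.slice row (some 0) (some (W - (2 * hk + 1) + 1))))) (i - hk) []))).map (fun v => min 255 v))[m]? = some (min 255 ((((PySem.List.pyRange (i - hk + 1) (i + hk + 1) 1).foldl (fun cur r =>
        List.zipWith min cur (PySem.List.pyGetD (binary.map (fun row =>
          (PySem.List.pyRange 1 (2 * hk + 1) 1).foldl (fun cur t =>
            List.zipWith min cur (PySem.List.slice row (some t) (some (t + (W - (2 * hk + 1) + 1)))))
            (PySem.List.slice row (some 0) (some (W - (2 * hk + 1) + 1))))) r []))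
      (PySem.List.pyGetD (binary.map (fun row =>
          (PySem.List.pyRange 1 (2 * hk + 1) 1).foldl (fun cur t =>
            List.zipWith min cur (PySem.List.slice row (some t) (some (t + (W - (2 * hk + 1) + 1)))))
            (PySem.List.slice row (some 0) (some (W - (2 * hk + 1) + 1))))) (i - hk) []))).getD m 0)) := by
    intro m hm
    rw [List.getElem?_eq_getElem (by rw [lmid]; omega)]
    rw [List.getElem_map]
    rw [List.getD_eq_getElem _ _ (by rw [hcur.1]; omega)]
  apply List.ext_getElem?
  intro n
  rw [List.append_assoc]
  rw [foldl_pySetD_getElem? _ _ (PySem.List.nodup_pyRange_one _ _)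
      (fun j hj => by rw [PySem.List.mem_pyRange_one] at hj; omega)]
  simp only [List.getElem?_append, List.length_replicate]
  rw [lmid]
  by_cases h1 : n < hk.toNat
  · rw [if_neg (by rw [PySem.List.mem_pyRange_one]; omega)]
    rw [if_pos h1]
    rw [List.getElem?_replicate, if_pos (by omega), List.getElem?_replicate, if_pos h1]
  · by_cases h2 : n < hk.toNat + (W - (2 * hk + 1) + 1).toNat
    · rw [if_pos (by rw [PySem.List.mem_pyRange_one]; omega)]
      rw [if_neg h1, if_pos (by omega)]
      rw [gmid (n - hk.toNat) (by omega)]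
      rw [List.getElem?_replicate, if_pos (by omega)]
      simp only [Option.map_some]
      congr 1
      rw [mvalA_eq binary hk i (n : Int) W hh hi1 (by omega) (by omega) (by omega) hrows]
      rw [hcur.2 (n - hk.toNat) (by omega)]
      have hcast : ((n - hk.toNat : Nat) : Int) + hk = (n : Int) := by omega
      rw [hcast]
      exact foldl_min_eq_tmin _ (colmins_ne_nil binary hk i _ hh) 255
    · by_cases h3 : n < W.toNat
      · rw [if_neg (by rw [PySem.List.mem_pyRange_one]; omega)]
        rw [if_neg h1, if_neg (by omega)]
        rw [List.getElem?_replicate, if_pos h3, List.getElem?_replicate, if_pos (by omega)]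
      · rw [if_neg (by rw [PySem.List.mem_pyRange_one]; omega)]
        rw [if_neg h1, if_neg (by omega)]
        rw [List.getElem?_replicate, if_neg h3, List.getElem?_replicate, if_neg (by omega)]

-- ===== VERDICT (by name: the statement is the Claim_ definition above) =====
theorem erode_spec : Claim_equal_erode := by
  intro binary ks hdom hpre
  clear hdom
  unfold Spec_erode
  obtain ⟨hne, hks, hcond⟩ := hpre
  have hW : (PySem.List.pyGet? binary 0).getD [] = binary.headI := by
    cases binary with
    | nil => exact absurd rfl hne
    | cons a l => rw [PySem.List.pyGet?_zero_cons]; rfl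
  have hhk : 0 ≤ PySem.Int.floordiv ks 2 := by
    rw [PySem.Int.floordiv_eq_ediv_of_pos (by norm_num)]
    exact Int.ediv_nonneg hks (by norm_num)
  simp only [erode, erode_alt, hW]
  set hk : Int := PySem.Int.floordiv ks 2 with hhkdef
  set W : Int := (binary.headI.length : Int) with hWdef
  set H : Int := (binary.length : Int) with hHdef
  by_cases hiw : W - (2 * hk + 1) + 1 ≤ 0
  · rw [if_pos hiw]
    have hjr : PySem.List.pyRange hk (W - hk) 1 = [] := PySem.List.pyRange_one_eq_nil (by omega)
    rw [hjr]
    simp only [List.foldl_nil, PySem.List.foldl_ignore]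
    have hWt : W.toNat = binary.headI.length := by omega
    rw [hWt]
  · rw [if_neg hiw]
    have hWk : 2 * hk + 1 ≤ W := by omega
    -- B as a map over row indices
    have hBpull : ∀ (c : Int → Prop) [DecidablePred c] (X Y : Int → List Int) (init : List (List Int)),
        (PySem.List.pyRange 0 H 1).foldl (fun result i =>
          if c i then result ++ [X i] else result ++ [Y i]) init
        = init ++ (PySem.List.pyRange 0 H 1).map (fun i => if c i then X i else Y i) := by
      intro c _ X Y init
      rw [show (fun (result : List (List Int)) (i : Int) =>
            if c i then result ++ [X i] else result ++ [Y i])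
          = (fun result i => result ++ [if c i then X i else Y i]) from
          funext fun res => funext fun i => by split_ifs <;> rfl]
      exact PySem.List.foldl_append_singleton_eq_map _ _ _
    rw [hBpull]
    rw [List.nil_append]
    by_cases hH : 2 * hk + 1 ≤ H
    · -- main case
      have hrows : ∀ row ∈ binary, W ≤ (row.length : Int) := by
        intro row hr
        have := hcond ⟨hH, hWk⟩ row hr
        show (binary.headI.length : Int) ≤ (row.length : Int)
        exact_mod_cast this
      -- A as a fold of whole-row rewrites
      have hA : ∀ (res : List (List Int)),
          (PySem.List.pyRange hk (H - hk) 1).foldl (fun result i =>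
            (PySem.List.pyRange hk (W - hk) 1).foldl (fun result j =>
              pySet2 result i j
                ((PySem.List.pyRange (-hk) (hk + 1) 1).foldl (fun m ki =>
                  (PySem.List.pyRange (-hk) (hk + 1) 1).foldl (fun m kj =>
                    min m (PySem.List.pyGetD (PySem.List.pyGetD binary (i + ki) []) (j + kj) 0)) m) 255)) result) res
          = (PySem.List.pyRange hk (H - hk) 1).foldl (fun result i =>
              PySem.List.pySetD result i
                ((PySem.List.pyRange hk (W - hk) 1).foldl (fun row j => PySem.List.pySetD row j
                  ((PySem.List.pyRange (-hk) (hk + 1) 1).foldl (fun m ki =>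
                    (PySem.List.pyRange (-hk) (hk + 1) 1).foldl (fun m kj =>
                      min m (PySem.List.pyGetD (PySem.List.pyGetD binary (i + ki) []) (j + kj) 0)) m) 255))
                  (PySem.List.pyGetD result i []))) res := by
        intro res
        apply PySem.List.foldl_congr_mem
        intro acc i hi
        rw [PySem.List.mem_pyRange_one] at hi
        exact foldl_pySet2_eq i (by omega) _ _ acc
      rw [hA]
      apply List.ext_getElem?
      intro n
      have hAchar := foldl_pySetD_modify_getElem?
        (g := fun i old => (PySem.List.pyRange hk (W - hk) 1).foldl (fun row j => PySem.List.pySetD row j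
          ((PySem.List.pyRange (-hk) (hk + 1) 1).foldl (fun m ki =>
            (PySem.List.pyRange (-hk) (hk + 1) 1).foldl (fun m kj =>
              min m (PySem.List.pyGetD (PySem.List.pyGetD binary (i + ki) []) (j + kj) 0)) m) 255)) old)
        (d := ([] : List Int))
        (PySem.List.pyRange hk (H - hk) 1) (PySem.List.nodup_pyRange_one _ _)
        (fun j hj => by rw [PySem.List.mem_pyRange_one] at hj; omega)
        (List.replicate binary.length (List.replicate binary.headI.length 0)) n
      beta_reduce at hAchar
      rw [hAchar]
      have lmap : ∀ (f : Int → List Int), ((PySem.List.pyRange 0 H 1).map f).length = binary.length := by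
        intro f
        rw [List.length_map, PySem.List.length_pyRange_one]
        omega
      by_cases hn : n < binary.length
      · have gmap : ∀ (f : Int → List Int),
            ((PySem.List.pyRange 0 H 1).map f)[n]? = some (f n) := by
          intro f
          rw [List.getElem?_eq_getElem (by rw [lmap]; omega)]
          simp only [List.getElem_map, PySem.List.getElem_pyRange_one]
          rw [zero_add]
        rw [gmap]
        rw [List.getElem?_replicate, if_pos hn]
        by_cases hin : hk ≤ (n : Int) ∧ (n : Int) < H - hk
        · rw [if_pos (by rw [PySem.List.mem_pyRange_one]; exact hin)]
          rw [if_pos hin]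
          simp only [Option.map_some]
          congr 1
          have hrepl : (List.replicate binary.headI.length (0 : Int)) = List.replicate W.toNat 0 := rfl
          rw [hrepl]
          exact rowA_eq_rowB binary hk (n : Int) W hhk hWk hin.1 (by omega) hrows
        · rw [if_neg (by rw [PySem.List.mem_pyRange_one]; exact hin)]
          rw [if_neg hin]
          rfl
      · rw [if_neg (by rw [PySem.List.mem_pyRange_one]; omega)]
        rw [List.getElem?_eq_none (by simp; omega), List.getElem?_eq_none (by rw [lmap]; omega)]
    · -- interior empty: both sides are the zero matrix
      have hout : PySem.List.pyRange hk (H - hk) 1 = [] := PySem.List.pyRange_one_eq_nil (by omega)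
      rw [hout]
      simp only [List.foldl_nil]
      rw [List.map_congr_left (g := fun _ => List.replicate W.toNat 0)
        (fun i hi => by
          rw [PySem.List.mem_pyRange_one] at hi
          rw [if_neg (by omega)])]
      rw [List.map_const', PySem.List.length_pyRange_one]
      have h1 : (H - 0).toNat = binary.length := by omega
      rw [h1]
      rfl
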